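-- pv_equiv track=rewrite | github.com/seanchatmangpt/knhk | scripts/fix_chicago_tdd.py | fix_unwrap_calls
-- ===== SOURCE A (Python) =====
-- def fix_unwrap_calls(content):
--     """Replace unwrap() with proper error handling in tests"""
--     # In tests, expect() is acceptable, but unwrap() should be replaced
--     # Pattern: .unwrap() -> .expect("descriptive message")
--     lines = content.split('\n')
--     fixed_lines = []
--     for line in lines:
--         # Replace unwrap() with expect() in test contexts
--         if 'unwrap()' in line and ('#[test]' in '\n'.join(fixed_lines[-5:]) or 'fn test_' in '\n'.join(fixed_lines[-5:])):
--             # Try to create a descriptive message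
--             if 'result' in line.lower():
--                 line = line.replace('.unwrap()', '.expect("Test should succeed")')
--             elif 'value' in line.lower() or 'val' in line.lower():
--                 line = line.replace('.unwrap()', '.expect("Test value should exist")')
--             else:
--                 line = line.replace('.unwrap()', '.expect("Test assertion failed")')
--         fixed_lines.append(line)
--     return '\n'.join(fixed_lines)
-- ===== SOURCE B (Python) =====
-- def _fix_line(line):
--     low = line.lower()
--     if 'result' in low:
--         return line.replace('.unwrap()', '.expect("Test should succeed")')
--     if 'value' in low or 'val' in low:
--         return line.replace('.unwrap()', '.expect("Test value should exist")')
--     return line.replace('.unwrap()', '.expect("Test assertion failed")')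
--
--
-- def fix_unwrap_calls(content):
--     """Replace unwrap() with proper error handling in tests (single pass, countdown)."""
--     out = []
--     in_test = 0  # > 0 iff one of the previous 5 emitted lines holds a test marker
--     for line in content.split('\n'):
--         if in_test > 0 and 'unwrap()' in line:
--             line = _fix_line(line)
--         out.append(line)
--         if '#[test]' in line or 'fn test_' in line:
--             in_test = 5
--         else:
--             in_test = max(0, in_test - 1)
--     return '\n'.join(out)
-- ===== Notes on version B (the rewrite author's own statement) =====
-- stated objective: alternative
-- what changed: Replaces the per-line rescan-and-rejoin of the last five emitted lines ('\n'.join(fixed_lines[-5:]) searched for the test markers on every line) with a single forward pass that maintains an integer countdown in_test (set to 5 on a marker line, decremented otherwise), so no window is ever rebuilt or rescanned.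
import Mathlib
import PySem

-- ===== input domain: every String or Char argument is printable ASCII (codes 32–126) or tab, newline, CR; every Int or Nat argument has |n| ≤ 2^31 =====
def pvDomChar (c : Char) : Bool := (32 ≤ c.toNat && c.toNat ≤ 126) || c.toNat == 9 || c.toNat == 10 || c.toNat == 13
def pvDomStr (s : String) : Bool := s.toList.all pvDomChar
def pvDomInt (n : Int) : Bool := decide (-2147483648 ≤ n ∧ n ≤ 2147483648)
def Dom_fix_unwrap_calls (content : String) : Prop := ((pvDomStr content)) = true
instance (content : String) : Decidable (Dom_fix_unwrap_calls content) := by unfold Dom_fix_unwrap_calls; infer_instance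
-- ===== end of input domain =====

-- B replaces A's per-line rejoin-and-rescan of the last five emitted lines with a
-- single forward pass maintaining an integer countdown (alternative decomposition).

-- ===== PORT A =====
-- the loop over lines, carrying the accumulating fixed_lines list exactly as A does
def pvLoopA : List String → List String → List String
  | fixed_lines, [] => fixed_lines
  | fixed_lines, line :: rest =>
    let line :=
      if PySem.Str.isIn "unwrap()" line &&
          (PySem.Str.isIn "#[test]"
              (PySem.Str.join "\n" (PySem.List.slice fixed_lines (some (-5)) none)) ||
           PySem.Str.isIn "fn test_"
              (PySem.Str.join "\n" (PySem.List.slice fixed_lines (some (-5)) none))) then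
        if PySem.Str.isIn "result" (PySem.Str.lower line) then
          PySem.Str.replace line ".unwrap()" ".expect(\"Test should succeed\")"
        else if PySem.Str.isIn "value" (PySem.Str.lower line) ||
                PySem.Str.isIn "val" (PySem.Str.lower line) then
          PySem.Str.replace line ".unwrap()" ".expect(\"Test value should exist\")"
        else
          PySem.Str.replace line ".unwrap()" ".expect(\"Test assertion failed\")"
      else line
    pvLoopA (fixed_lines ++ [line]) rest

def fix_unwrap_calls (content : String) : String :=
  let lines := (PySem.Str.split? content "\n").getD []
  PySem.Str.join "\n" (pvLoopA [] lines)

-- ===== PORT B =====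
def pvFixLine (line : String) : String :=
  let low := PySem.Str.lower line
  if PySem.Str.isIn "result" low then
    PySem.Str.replace line ".unwrap()" ".expect(\"Test should succeed\")"
  else if PySem.Str.isIn "value" low || PySem.Str.isIn "val" low then
    PySem.Str.replace line ".unwrap()" ".expect(\"Test value should exist\")"
  else
    PySem.Str.replace line ".unwrap()" ".expect(\"Test assertion failed\")"

-- single pass: in_test is the countdown, the output list is built directly
def pvLoopB (in_test : Nat) : List String → List String
  | [] => []
  | line :: rest =>
    let line := if in_test > 0 && PySem.Str.isIn "unwrap()" line then pvFixLine line else line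
    let in_test' :=
      if PySem.Str.isIn "#[test]" line || PySem.Str.isIn "fn test_" line then 5
      else in_test - 1
    line :: pvLoopB in_test' rest

def fix_unwrap_calls_alt (content : String) : String :=
  PySem.Str.join "\n" (pvLoopB 0 ((PySem.Str.split? content "\n").getD []))

-- ===== PRECONDITION & SPEC =====
def Spec_fix_unwrap_calls (content : String) (out : String) : Prop := out = fix_unwrap_calls_alt content
instance (content : String) (out : String) : Decidable (Spec_fix_unwrap_calls content out) := by unfold Spec_fix_unwrap_calls; infer_instance

-- ===== CLAIM (what is proved, stated in full; the proofs are below) =====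
def Claim_equal_fix_unwrap_calls : Prop := ∀ (content : String), Dom_fix_unwrap_calls content → Spec_fix_unwrap_calls content (fix_unwrap_calls content)

-- ===== LEMMAS AND PROOFS =====

-- marker test on one line (B's per-line view of A's window search)
def pvMark (line : String) : Bool :=
  PySem.Str.isIn "#[test]" line || PySem.Str.isIn "fn test_" line

-- B's countdown, recomputed from the emitted prefix (the loop invariant's value)
def pvCtr (fixed : List String) : Nat :=
  fixed.foldl (fun c l => if pvMark l then 5 else c - 1) 0

-- an occurrence of a pattern not containing c in a ++ c :: b lies inside a or inside b
lemma pv_infix_append_cons (sub a b : List Char) (c : Char) (hc : c ∉ sub) :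
    sub <:+: (a ++ c :: b) ↔ sub <:+: a ∨ sub <:+: b := by
  constructor
  · rintro ⟨s, t, h⟩
    rcases Nat.lt_or_ge a.length (s.length + sub.length) with h1 | h1
    · rcases Nat.lt_or_ge a.length s.length with h2 | h2
      · -- the occurrence starts after c : it lies inside b
        right
        have hd := congrArg (List.drop (a.length + 1)) h
        simp only [List.drop_append, List.length_append] at hd
        rw [Nat.sub_eq_zero_of_le (by omega : a.length + 1 ≤ s.length),
            Nat.sub_eq_zero_of_le (by omega : a.length + 1 ≤ s.length + sub.length),
            List.drop_eq_nil_of_le (by omega : a.length ≤ a.length + 1),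
            (by omega : a.length + 1 - a.length = 1)] at hd
        simp only [List.drop_zero, List.drop_one, List.tail_cons, List.nil_append] at hd
        exact ⟨s.drop (a.length + 1), t, hd⟩
      · -- the occurrence straddles c : impossible, c ∉ sub
        exfalso
        apply hc
        have hA : (a ++ c :: b)[a.length]? = some c := by
          rw [List.getElem?_append_right (le_refl a.length)]
          simp
        rw [← h] at hA
        rw [List.append_assoc, List.getElem?_append_right h2,
            List.getElem?_append_left (by omega : a.length - s.length < sub.length)] at hA
        exact List.mem_of_getElem? hA
    · -- the occurrence ends before c : it lies inside a
      left
      have hd := congrArg (List.take a.length) h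
      simp only [List.take_append, List.length_append] at hd
      rw [List.take_of_length_le (by omega : s.length ≤ a.length),
          List.take_of_length_le (by omega : sub.length ≤ a.length - s.length),
          List.take_length, Nat.sub_self] at hd
      simp only [List.take_zero, List.append_nil] at hd
      exact ⟨s, t.take (a.length - (s.length + sub.length)), hd⟩
  · rintro (⟨s, t, h⟩ | ⟨s, t, h⟩)
    · refine ⟨s, t ++ c :: b, ?_⟩
      rw [← h]; simp
    · refine ⟨a ++ c :: s, t, ?_⟩
      rw [← h]; simp

-- a newline-free nonempty pattern occurs in a '\n'-join iff it occurs in some part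
lemma pv_isIn_join (sub : List Char) (hne : sub ≠ []) (hc : '\n' ∉ sub) :
    ∀ ls : List (List Char),
      PySem.Chars.isIn sub (PySem.Chars.join ['\n'] ls)
        = ls.any (fun l => PySem.Chars.isIn sub l)
  | [] => by
      rw [PySem.Chars.join_nil, List.any_nil]
      rw [PySem.Chars.isIn_eq_false_iff]
      intro h'
      exact hne (List.sublist_nil.mp h'.sublist)
  | [l] => by
      rw [PySem.Chars.join_singleton]
      simp
  | l :: l' :: rest => by
      have ih := pv_isIn_join sub hne hc (l' :: rest)
      rw [PySem.Chars.join_cons_cons, List.append_assoc, List.singleton_append,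
          Bool.eq_iff_iff]
      rw [PySem.Chars.isIn_iff_infix, pv_infix_append_cons sub l _ '\n' hc,
          ← PySem.Chars.isIn_iff_infix, ← PySem.Chars.isIn_iff_infix, ih]
      simp [List.any_cons]

lemma pv_any_or (l : List String) (p q : String → Bool) :
    l.any (fun x => p x || q x) = (l.any p || l.any q) := by
  induction l with
  | nil => rfl
  | cons x xs ih => simp [List.any_cons, ih, Bool.or_assoc, Bool.or_left_comm]

-- A's window test over the emitted prefix = a marker within the last 5 emitted lines
lemma pv_window_eq_any (fixed : List String) :
    (PySem.Str.isIn "#[test]" (PySem.Str.join "\n" (PySem.List.slice fixed (some (-5)) none)) ||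
     PySem.Str.isIn "fn test_" (PySem.Str.join "\n" (PySem.List.slice fixed (some (-5)) none)))
      = (PySem.List.slice fixed (some (-5)) none).any pvMark := by
  have h1 : ∀ t : String, t.toList ≠ [] → '\n' ∉ t.toList →
      PySem.Str.isIn t (PySem.Str.join "\n" (PySem.List.slice fixed (some (-5)) none))
        = (PySem.List.slice fixed (some (-5)) none).any (fun l => PySem.Str.isIn t l) := by
    intro t ht hn
    rw [PySem.Str.isIn_eq, PySem.Str.toList_join]
    have hsep : ("\n" : String).toList = ['\n'] := rfl
    rw [hsep, pv_isIn_join t.toList ht hn]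
    rw [List.any_map]
    simp [PySem.Str.isIn_eq, Function.comp_def]
  rw [h1 "#[test]" (by decide) (by decide), h1 "fn test_" (by decide) (by decide),
      ← pv_any_or]
  unfold pvMark
  simp [PySem.Str.isIn_eq]

-- marker within the first n of r ↔ the marker-free prefix of r is shorter than both n and r
lemma pv_take_any (r : List String) : ∀ n : Nat,
    (r.take n).any pvMark
      = decide ((r.takeWhile (fun l => !pvMark l)).length < n ∧
                (r.takeWhile (fun l => !pvMark l)).length < r.length) := by
  induction r with
  | nil => intro n; simp
  | cons x xs ih =>
    intro n
    cases n with
    | zero => simp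
    | succ m =>
      by_cases hx : pvMark x = true
      · rw [List.take_succ_cons, List.any_cons, hx, Bool.true_or,
            List.takeWhile_cons_of_neg (by simp [hx])]
        simp
      · rw [List.take_succ_cons, List.any_cons, Bool.eq_false_iff.mpr hx, Bool.false_or,
            List.takeWhile_cons_of_pos (by simp [Bool.eq_false_iff.mpr hx]), ih m]
        simp only [List.length_cons]
        rw [decide_eq_decide]
        omega

lemma pv_ctr_append (fixed : List String) (l : String) :
    pvCtr (fixed ++ [l]) = if pvMark l then 5 else pvCtr fixed - 1 := by
  simp [pvCtr, List.foldl_append]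

-- the countdown's closed form: 0 if no marker at all, else 5 minus the marker-free suffix length
lemma pv_ctr_eq (fixed : List String) :
    pvCtr fixed =
      if (fixed.reverse.takeWhile (fun l => !pvMark l)).length = fixed.length then 0
      else 5 - (fixed.reverse.takeWhile (fun l => !pvMark l)).length := by
  induction fixed using List.reverseRecOn with
  | nil => simp [pvCtr]
  | append_singleton xs x ih =>
    rw [pv_ctr_append, List.reverse_append, List.reverse_singleton, List.singleton_append]
    by_cases hx : pvMark x = true
    · rw [if_pos hx, List.takeWhile_cons_of_neg (by simp [hx])]
      simp
    · rw [if_neg hx, List.takeWhile_cons_of_pos (by simp [Bool.eq_false_iff.mpr hx]), ih]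
      have hle : (xs.reverse.takeWhile (fun l => !pvMark l)).length ≤ xs.length := by
        have h := (List.takeWhile_sublist (l := xs.reverse) (fun l => !pvMark l)).length_le
        simpa using h
      simp only [List.length_cons, List.length_append, List.length_nil]
      by_cases htf : (xs.reverse.takeWhile (fun l => !pvMark l)).length = xs.length
      · rw [if_pos htf, if_pos (by omega)]
      · rw [if_neg htf, if_neg (by omega)]
        omega

-- the two guards agree: marker in the last five emitted lines ↔ countdown positive
lemma pv_guard_eq (fixed : List String) :
    ((PySem.List.slice fixed (some (-5)) none).any pvMark) = decide (0 < pvCtr fixed) := by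
  rw [PySem.List.slice_from_neg_ofNat fixed 5 (by omega)]
  have hrev : (fixed.drop (fixed.length - 5)).any pvMark
      = (fixed.reverse.take 5).any pvMark := by
    rw [List.take_reverse, List.any_reverse]
  rw [hrev, pv_take_any fixed.reverse 5, pv_ctr_eq, List.length_reverse]
  have hle : (fixed.reverse.takeWhile (fun l => !pvMark l)).length ≤ fixed.length := by
    have h := (List.takeWhile_sublist (l := fixed.reverse) (fun l => !pvMark l)).length_le
    simpa using h
  rw [decide_eq_decide]
  split_ifs with h
  · omega
  · omega

-- main loop correspondence: A's accumulating loop = prefix ++ B's single pass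
lemma pv_loop_eq (rest : List String) : ∀ fixed : List String,
    pvLoopA fixed rest = fixed ++ pvLoopB (pvCtr fixed) rest := by
  induction rest with
  | nil => intro fixed; simp [pvLoopA, pvLoopB]
  | cons line rest ih =>
    intro fixed
    have hguard : (PySem.Str.isIn "unwrap()" line &&
        (PySem.Str.isIn "#[test]"
            (PySem.Str.join "\n" (PySem.List.slice fixed (some (-5)) none)) ||
         PySem.Str.isIn "fn test_"
            (PySem.Str.join "\n" (PySem.List.slice fixed (some (-5)) none))))
        = (decide (0 < pvCtr fixed) && PySem.Str.isIn "unwrap()" line) := by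
      rw [pv_window_eq_any fixed, pv_guard_eq fixed, Bool.and_comm]
    simp only [pvLoopA, pvLoopB, hguard, pvFixLine]
    rw [ih, pv_ctr_append]
    cases hg : (decide (0 < pvCtr fixed) && PySem.Str.isIn "unwrap()" line) <;>
      simp [pvMark]

-- ===== VERDICT (by name: the statement is the Claim_ definition above) =====
theorem fix_unwrap_calls_spec : Claim_equal_fix_unwrap_calls := by
  intro content _
  unfold Spec_fix_unwrap_calls fix_unwrap_calls fix_unwrap_calls_alt
  have h := pv_loop_eq ((PySem.Str.split? content "\n").getD []) []
  simp [pvCtr] at h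
  simp [h]
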